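-- pv_equiv track=rewrite | github.com/barryWhiteHat/roll_up | pythonWrapper/utils.py | libsnark2python
-- ===== SOURCE A (Python) =====
-- def libsnark2python (inputs):
--     #flip the inputs
--
--     bin_inputs = []
--     for x in inputs:
--         binary = bin(x)[2:][::-1]
--
--         if len(binary) > 100:
--             binary = binary.ljust(253, "0")
--         bin_inputs.append(binary)
--     raw = "".join(bin_inputs)
--
--     raw += "0" * (256 * 5 - len(raw))
--
--     output = []
--     i = 0
--     while i < len(raw):
--         hexnum = hex(int(raw[i:i+256], 2))
--         #pad leading zeros
--         padding = 66 - len(hexnum)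
--         hexnum = hexnum[:2] + "0"*padding + hexnum[2:]
--
--         output.append(hexnum)
--         i += 256
--     return(output)
-- ===== SOURCE B (Python) =====
-- def libsnark2python(inputs):
--     # Streaming rewrite: instead of building one big bit-string, joining,
--     # padding and slicing it, keep a small integer bit-buffer and emit each
--     # 256-bit word as soon as enough bits have accumulated.
--     words = []   # completed 256-bit words, MSB-first, as ints
--     acc = 0      # buffered bits (MSB-first value)
--     nbits = 0    # number of buffered bits
--     for x in inputs:
--         # value/length of the reversed binary expansion of x, computed numerically
--         L = max(1, x.bit_length())
--         v = 0
--         t = x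
--         for _ in range(L):
--             v = 2 * v + t % 2
--             t //= 2
--         if L > 100:
--             v *= 2 ** (253 - L)
--             L = 253
--         acc = acc * 2 ** L + v
--         nbits += L
--         while nbits >= 256:
--             words.append(acc // 2 ** (nbits - 256))
--             acc %= 2 ** (nbits - 256)
--             nbits -= 256
--     total = 256 * len(words) + nbits
--     pad = max(total, 256 * 5) - total
--     acc *= 2 ** pad
--     nbits += pad
--     while nbits >= 256:
--         words.append(acc // 2 ** (nbits - 256))
--         acc %= 2 ** (nbits - 256)
--         nbits -= 256
--     if nbits:
--         words.append(acc)
--     return ["0x" + format(w, "x").zfill(64) for w in words]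
-- ===== Notes on version B (the rewrite author's own statement) =====
-- stated objective: alternative
-- what changed: A materialises the whole bit-string (reverse, join, pad) and then slices it into 256-char pieces parsed with int(chunk,2); B never builds a string: it computes each input's reversed-binary value arithmetically and streams it through a small integer bit-buffer, emitting each 256-bit word by div/mod as soon as 256 bits have accumulated.
import Mathlib
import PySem

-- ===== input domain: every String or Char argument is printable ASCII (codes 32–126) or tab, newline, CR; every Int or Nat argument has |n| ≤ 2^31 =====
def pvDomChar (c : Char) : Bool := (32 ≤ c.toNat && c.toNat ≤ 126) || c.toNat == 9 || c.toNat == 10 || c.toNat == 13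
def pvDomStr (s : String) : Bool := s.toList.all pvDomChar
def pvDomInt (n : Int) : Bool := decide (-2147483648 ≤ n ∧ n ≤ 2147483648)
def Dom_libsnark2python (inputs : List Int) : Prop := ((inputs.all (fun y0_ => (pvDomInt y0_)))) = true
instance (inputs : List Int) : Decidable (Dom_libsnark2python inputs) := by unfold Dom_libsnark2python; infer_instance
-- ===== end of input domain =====

-- B replaces A's build-join-pad-slice of a big bit-string by streaming the bits
-- through a small integer buffer, emitting each 256-bit word as it fills
-- (objective: alternative; equivalence of the RETURN value on Pre_ is what is proved).

-- ===== PORT A =====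

-- shared digit helpers (ports of the builtins bin() / hex() digit strings)
def pvBitChar (b : Nat) : Char := if b = 1 then '1' else '0'

def pvHexChar (b : Nat) : Char := if b < 10 then Char.ofNat (48 + b) else Char.ofNat (87 + b)

-- digits of m in base 2, MSB first (empty for 0) — bin(m)[2:] is pvBinDigits
def pvBinAux (m : Nat) : List Char :=
  if h : m = 0 then [] else pvBinAux (m / 2) ++ [pvBitChar (m % 2)]
decreasing_by exact Nat.div_lt_self (Nat.pos_of_ne_zero h) one_lt_two

def pvBinDigits (m : Nat) : List Char := if m = 0 then ['0'] else pvBinAux m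

def pvHexAux (m : Nat) : List Char :=
  if h : m = 0 then [] else pvHexAux (m / 16) ++ [pvHexChar (m % 16)]
decreasing_by exact Nat.div_lt_self (Nat.pos_of_ne_zero h) (by norm_num)

-- hex(m)[2:] for a nonnegative m (the only values hex() receives here)
def pvHexDigits (m : Nat) : List Char := if m = 0 then ['0'] else pvHexAux m

-- int(s, 2): exact for strings of '0'/'1' digits (the only chunks reached inside Pre_)
def pvBitsVal (s : List Char) : Nat :=
  s.foldl (fun a c => 2 * a + (if c = '1' then 1 else 0)) 0

-- body of A's first loop: bin(x)[2:][::-1], conditionally ljust(253,'0')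
-- (bin() ported via x.toNat: inputs are nonnegative inside Pre_)
def pvPieceA (x : Int) : List Char :=
  let binary := (pvBinDigits x.toNat).reverse
  if binary.length > 100 then binary ++ List.replicate (253 - binary.length) '0' else binary

-- A's while loop over raw in steps of 256
def pvChunksA (cs : List Char) : List String :=
  if h : cs = [] then [] else
    let hexnum := '0' :: 'x' :: pvHexDigits (pvBitsVal (cs.take 256))
    let padding := 66 - hexnum.length
    String.mk (hexnum.take 2 ++ List.replicate padding '0' ++ hexnum.drop 2) :: pvChunksA (cs.drop 256)
termination_by cs.length
decreasing_by
  have : cs.length ≠ 0 := by simpa using h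
  simp; omega

def libsnark2python (inputs : List Int) : List String :=
  let bin_inputs := inputs.foldl (fun acc x => acc ++ [pvPieceA x]) ([] : List (List Char))
  let raw := bin_inputs.flatten
  let raw2 := raw ++ List.replicate (256 * 5 - raw.length) '0'
  pvChunksA raw2

-- ===== PORT B =====

-- B's inner loop: value of x's reversed binary expansion (t ported via toNat: nonnegative inside Pre_)
def pvRevBits : Nat → Nat → Nat → Nat
  | 0, v, _ => v
  | f + 1, v, t => pvRevBits f (2 * v + t % 2) (t / 2)

-- value/length of one input's contribution (the L > 100 branch mirrors Source B)
def pvPieceB (x : Int) : Nat × Nat :=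
  let L := max 1 (PySem.Int.bitLength x)
  let v := pvRevBits L 0 x.toNat
  if L > 100 then (v * 2 ^ (253 - L), 253) else (v, L)

-- B's while loop: emit full 256-bit words out of the buffer
def pvFlushB (words : List Nat) (acc nbits : Nat) : List Nat × Nat × Nat :=
  if h : 256 ≤ nbits then
    pvFlushB (words ++ [acc / 2 ^ (nbits - 256)]) (acc % 2 ^ (nbits - 256)) (nbits - 256)
  else (words, acc, nbits)
termination_by nbits
decreasing_by omega

def pvFmtB (w : Nat) : String :=
  let d := pvHexDigits w
  String.mk ('0' :: 'x' :: (List.replicate (64 - d.length) '0' ++ d))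

def libsnark2python_alt (inputs : List Int) : List String :=
  let st := inputs.foldl (fun (st : List Nat × Nat × Nat) x =>
      let (v, L) := pvPieceB x
      pvFlushB st.1 (st.2.1 * 2 ^ L + v) (st.2.2 + L)) ([], 0, 0)
  let total := 256 * st.1.length + st.2.2
  let pad := max total (256 * 5) - total
  let st2 := pvFlushB st.1 (st.2.1 * 2 ^ pad) (st.2.2 + pad)
  let words := if st2.2.2 ≠ 0 then st2.1 ++ [st2.2.1] else st2.1
  words.map pvFmtB

-- ===== PRECONDITION & SPEC =====
-- Pre_ excludes inputs containing a negative integer: there bin(x) is '-0b…' and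
-- A raises ValueError when int(chunk, 2) meets the leftover 'b'/'-' characters.
def Pre_libsnark2python (inputs : List Int) : Prop := ∀ x ∈ inputs, 0 ≤ x
instance (inputs : List Int) : Decidable (Pre_libsnark2python inputs) := by unfold Pre_libsnark2python; infer_instance

def pvWitness_libsnark2python : List Int := [3, 0, 2147483647]

def Spec_libsnark2python (inputs : List Int) (out : List String) : Prop := out = libsnark2python_alt inputs
instance (inputs : List Int) (out : List String) : Decidable (Spec_libsnark2python inputs out) := by unfold Spec_libsnark2python; infer_instance

-- ===== CLAIM (what is proved, stated in full; the proofs are below) =====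
def Claim_equal_libsnark2python : Prop := ∀ (inputs : List Int), Dom_libsnark2python inputs → Pre_libsnark2python inputs → Spec_libsnark2python inputs (libsnark2python inputs)

-- ===== LEMMAS AND PROOFS =====

-- generalized accumulator form of pvBitsVal
def pvBvF (a : Nat) (s : List Char) : Nat :=
  s.foldl (fun a c => 2 * a + (if c = '1' then 1 else 0)) a

theorem pvBitsVal_eq : pvBitsVal = pvBvF 0 := rfl

theorem pvBvF_append (a : Nat) (s t : List Char) : pvBvF a (s ++ t) = pvBvF (pvBvF a s) t :=
  List.foldl_append

theorem pvBvF_eq (a : Nat) (s : List Char) : pvBvF a s = a * 2 ^ s.length + pvBvF 0 s := by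
  induction s generalizing a with
  | nil => simp [pvBvF]
  | cons c s ih =>
    show pvBvF (2 * a + _) s = a * 2 ^ (c :: s).length + pvBvF (2 * 0 + _) s
    rw [ih, ih (2 * 0 + _)]
    rw [List.length_cons, pow_succ]
    split <;> ring

theorem pvBvF_lt (s : List Char) : pvBvF 0 s < 2 ^ s.length := by
  induction s with
  | nil => simp [pvBvF]
  | cons c s ih =>
    show pvBvF (2 * 0 + _) s < 2 ^ (c :: s).length
    rw [pvBvF_eq]
    have hb : (if c = '1' then 1 else 0) ≤ 1 := by split <;> omega
    have h2 : (0:Nat) < 2 ^ s.length := by positivity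
    rw [List.length_cons, pow_succ]
    nlinarith

theorem pvBitsVal_append (s t : List Char) :
    pvBitsVal (s ++ t) = pvBitsVal s * 2 ^ t.length + pvBitsVal t := by
  rw [pvBitsVal_eq, pvBvF_append, pvBvF_eq]

theorem pvBitsVal_repl0 (k : Nat) : pvBitsVal (List.replicate k '0') = 0 := by
  induction k with
  | zero => rfl
  | succ k ih =>
    rw [List.replicate_succ]
    show pvBvF (2 * 0 + (if ('0':Char) = '1' then 1 else 0)) (List.replicate k '0') = 0
    rw [pvBvF_eq]
    simpa [pvBitsVal_eq] using ih

theorem pvBinAux_length (m : Nat) : (pvBinAux m).length = PySem.Int.bitLength (m : Int) := by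
  induction m using Nat.strong_induction_on with
  | _ m ih =>
    rw [pvBinAux]
    by_cases h : m = 0
    · simp [h, PySem.Int.bitLength_zero]
    · rw [dif_neg h, List.length_append]
      rw [ih (m / 2) (Nat.div_lt_self (Nat.pos_of_ne_zero h) one_lt_two)]
      rw [PySem.Int.bitLength_natCast (Nat.pos_of_ne_zero h)]
      simp

theorem pvBinAux_len_le (m k : Nat) (h : m < 2 ^ k) : (pvBinAux m).length ≤ k := by
  induction m using Nat.strong_induction_on generalizing k with
  | _ m ih =>
    rw [pvBinAux]
    by_cases hm : m = 0
    · simp [hm]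
    · rw [dif_neg hm, List.length_append]
      cases k with
      | zero => simp at h; omega
      | succ k =>
        have h2 : m / 2 < 2 ^ k := Nat.div_lt_of_lt_mul (by rw [pow_succ] at h; omega)
        have := ih (m / 2) (Nat.div_lt_self (Nat.pos_of_ne_zero hm) one_lt_two) k h2
        simp; omega

theorem pvRev_eq (m : Nat) (hm : m ≠ 0) :
    ∀ v, pvRevBits (pvBinAux m).length v m = pvBvF v (pvBinAux m).reverse := by
  induction m using Nat.strong_induction_on with
  | _ m ih =>
    intro v
    rw [pvBinAux, dif_neg hm, List.length_append, List.reverse_append]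
    have hbit : (if pvBitChar (m % 2) = '1' then (1:Nat) else 0) = m % 2 := by
      rcases Nat.mod_two_eq_zero_or_one m with h | h <;> simp [h, pvBitChar]
    have hstep : ∀ w, pvBvF w (pvBitChar (m % 2) :: (pvBinAux (m / 2)).reverse)
        = pvBvF (2 * w + m % 2) (pvBinAux (m / 2)).reverse := by
      intro w; show pvBvF (2 * w + _) _ = _; rw [hbit]
    simp only [List.reverse_singleton, List.singleton_append, List.length_singleton]
    rw [hstep]
    by_cases h2 : m / 2 = 0
    · rw [h2]
      show pvRevBits ((pvBinAux 0).length + 1) v m = _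
      rw [pvBinAux, dif_pos rfl]
      show pvRevBits 1 v m = 2 * v + m % 2
      show pvRevBits 0 (2 * v + m % 2) (m / 2) = _
      rfl
    · show pvRevBits ((pvBinAux (m/2)).length + 1) v m = _
      show pvRevBits ((pvBinAux (m/2)).length) (2 * v + m % 2) (m / 2) = _
      exact ih (m / 2) (Nat.div_lt_self (Nat.pos_of_ne_zero hm) one_lt_two) h2 _

theorem pvBinDigits_length (m : Nat) :
    (pvBinDigits m).length = max 1 (PySem.Int.bitLength (m : Int)) := by
  rw [pvBinDigits]
  by_cases h : m = 0
  · simp [h, PySem.Int.bitLength_zero]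
  · rw [if_neg h, pvBinAux_length]
    have := PySem.Int.bitLength_natCast (Nat.pos_of_ne_zero h) 
    omega

theorem pvPiece_eq (x : Int) (hx : 0 ≤ x) (hd : x ≤ 2147483648) :
    pvPieceB x = (pvBitsVal (pvPieceA x), (pvPieceA x).length) := by
  have hcast : ((x.toNat : Nat) : Int) = x := Int.toNat_of_nonneg hx
  set m := x.toNat with hm
  have hbl : PySem.Int.bitLength x = PySem.Int.bitLength (m : Int) := by rw [hcast]
  have hlen : (pvBinDigits m).length = max 1 (PySem.Int.bitLength (m : Int)) :=
    pvBinDigits_length m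
  have hb32 : (pvBinAux m).length ≤ 32 := by
    apply pvBinAux_len_le
    have : m ≤ 2147483648 := by omega
    omega
  have hlen32 : (pvBinDigits m).length ≤ 32 := by
    rw [pvBinDigits]
    by_cases h : m = 0
    · simp [h]
    · rw [if_neg h]; exact hb32
  have hA : pvPieceA x = (pvBinDigits m).reverse := by
    rw [pvPieceA]
    simp only [List.length_reverse, ← hm]
    rw [if_neg (by omega)]
  have hrev : pvRevBits (max 1 (PySem.Int.bitLength (m:Int))) 0 m
      = pvBitsVal ((pvBinDigits m).reverse) := by
    by_cases h : m = 0
    · rw [h]; decide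
    · have h1 : max 1 (PySem.Int.bitLength (m:Int)) = (pvBinAux m).length := by
        rw [← pvBinAux_length]
        have := pvBinAux_length m
        rw [this, PySem.Int.bitLength_natCast (Nat.pos_of_ne_zero h)] at *
        omega
      rw [h1, pvBinDigits, if_neg h, pvBitsVal_eq]
      exact pvRev_eq m h 0
  rw [pvPieceB]
  simp only [hbl, ← hm]
  rw [if_neg (by omega)]
  rw [hA, hrev, List.length_reverse, hlen]

-- values of the successive 256-char chunks of a bit-string
def pvChunkVals (s : List Char) : List Nat :=
  if h : s = [] then [] else pvBitsVal (s.take 256) :: pvChunkVals (s.drop 256)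
termination_by s.length
decreasing_by
  have : s.length ≠ 0 := by simpa using h
  simp; omega

theorem pvChunksA_eq (s : List Char) : pvChunksA s = (pvChunkVals s).map pvFmtB := by
  induction s using pvChunkVals.induct with
  | case1 => rw [pvChunksA, pvChunkVals]; rfl
  | case2 s h ih =>
    rw [pvChunksA, pvChunkVals, dif_neg h, dif_neg h, List.map_cons, ← ih]
    rw [pvFmtB]
    set d := pvHexDigits (pvBitsVal (s.take 256)) with hd
    have h3 : 66 - ('0'::'x'::d).length = 64 - d.length := by
      simp only [List.length_cons]; omega
    simp only [h3]
    rfl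

theorem pvSplit (u : List Char) (h : 256 ≤ u.length) :
    pvBitsVal u / 2 ^ (u.length - 256) = pvBitsVal (u.take 256) ∧
    pvBitsVal u % 2 ^ (u.length - 256) = pvBitsVal (u.drop 256) := by
  have hl : (u.drop 256).length = u.length - 256 := by simp
  have hv : pvBitsVal u = 2 ^ (u.length - 256) * pvBitsVal (u.take 256) + pvBitsVal (u.drop 256) := by
    conv_lhs => rw [← List.take_append_drop 256 u]
    rw [pvBitsVal_append, hl]; ring
  have hr : pvBitsVal (u.drop 256) < 2 ^ (u.length - 256) := by
    rw [← hl, pvBitsVal_eq]; exact pvBvF_lt _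
  constructor
  · rw [hv, Nat.mul_add_div (by positivity), Nat.div_eq_of_lt hr]; omega
  · rw [hv, Nat.mul_add_mod, Nat.mod_eq_of_lt hr]

theorem pvChunkVals_append (t c : List Char) (ht : t.length % 256 = 0) (hc : c ≠ [])
    (hc2 : c.length ≤ 256) : pvChunkVals (t ++ c) = pvChunkVals t ++ [pvBitsVal c] := by
  induction t using pvChunkVals.induct with
  | case1 =>
    have h0 : pvChunkVals ([] : List Char) = [] := by rw [pvChunkVals]; simp
    rw [List.nil_append, pvChunkVals, dif_neg hc, List.take_of_length_le hc2,
      List.drop_eq_nil_of_le hc2, h0, List.nil_append]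
  | case2 t h ih =>
    have hlen : 256 ≤ t.length := by
      have h0 : t.length ≠ 0 := by simpa using h
      omega
    conv_rhs => rw [pvChunkVals, dif_neg h]
    rw [pvChunkVals, dif_neg (by simp [h])]
    rw [List.take_append_of_le_length hlen, List.drop_append_of_le_length hlen]
    rw [List.cons_append]
    congr 1
    exact ih (by simp; omega)

-- loop invariant of B's streaming state against the bit-string consumed so far
def pvInv (s : List Char) (st : List Nat × Nat × Nat) : Prop :=
  256 * st.1.length + st.2.2 = s.length ∧
  st.2.1 = pvBitsVal (s.drop (256 * st.1.length)) ∧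
  st.1 = pvChunkVals (s.take (256 * st.1.length))

theorem pvFlush_inv (s : List Char) (nb : Nat) : ∀ w a, pvInv s (w, a, nb) →
    pvInv s (pvFlushB w a nb) ∧ (pvFlushB w a nb).2.2 < 256 := by
  induction nb using Nat.strong_induction_on with
  | _ nb ih =>
    intro w a hinv
    obtain ⟨h1, h2, h3⟩ := hinv
    dsimp only at h1 h2 h3
    rw [pvFlushB]
    by_cases h : 256 ≤ nb
    · rw [dif_pos h]
      set u := s.drop (256 * w.length) with hu
      have hul : u.length = nb := by rw [hu]; simp; omega
      have husplit := pvSplit u (by omega)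
      rw [hul] at husplit
      have htk : (s.take (256 * w.length)).length = 256 * w.length := by simp; omega
      have hcl : (u.take 256).length = 256 := by simp; omega
      have hwl : 256 * (w ++ [a / 2 ^ (nb - 256)]).length = 256 * w.length + 256 := by
        simp; ring
      have hdd : s.drop (256 * (w ++ [a / 2 ^ (nb - 256)]).length) = u.drop 256 := by
        rw [hwl, ← List.drop_drop, ← hu]
      have htt : s.take (256 * (w ++ [a / 2 ^ (nb - 256)]).length)
          = s.take (256 * w.length) ++ u.take 256 := by
        rw [hwl, List.take_add, ← hu]
      apply ih (nb - 256) (by omega)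
      refine ⟨?_, ?_, ?_⟩
      · dsimp only; simp only [List.length_append, List.length_cons, List.length_nil]; omega
      · dsimp only
        rw [hdd, ← husplit.2, h2]
      · dsimp only
        rw [htt]
        rw [pvChunkVals_append _ _ (by rw [htk]; simp) (by
            intro hh
            have hL := congrArg List.length hh
            rw [hcl] at hL
            simp at hL) (by rw [hcl])]
        rw [← h3, h2, husplit.1]
    · rw [dif_neg h]
      exact ⟨⟨h1, h2, h3⟩, by show nb < 256; omega⟩

theorem pvInv_app (s p : List Char) (w : List Nat) (a nb : Nat) (h : pvInv s (w, a, nb)) :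
    pvInv (s ++ p) (w, a * 2 ^ p.length + pvBitsVal p, nb + p.length) := by
  obtain ⟨h1, h2, h3⟩ := h
  dsimp only at h1 h2 h3
  have hle : 256 * w.length ≤ s.length := by omega
  refine ⟨?_, ?_, ?_⟩
  · dsimp only; simp only [List.length_append]; omega
  · dsimp only
    rw [List.drop_append_of_le_length hle, pvBitsVal_append, ← h2]
  · dsimp only
    rw [List.take_append_of_le_length hle, ← h3]

theorem pvInv_final (s : List Char) (w : List Nat) (a nb : Nat) (h : pvInv s (w, a, nb))
    (hnb : nb < 256) : (if nb ≠ 0 then w ++ [a] else w) = pvChunkVals s := by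
  obtain ⟨h1, h2, h3⟩ := h
  dsimp only at h1 h2 h3
  have hs : s = s.take (256 * w.length) ++ s.drop (256 * w.length) := (List.take_append_drop _ _).symm
  have hdl : (s.drop (256 * w.length)).length = nb := by simp; omega
  have htk : (s.take (256 * w.length)).length = 256 * w.length := by simp; omega
  by_cases h0 : nb = 0
  · rw [if_neg (by simp [h0])]
    have : s.drop (256 * w.length) = [] := by
      apply List.length_eq_zero_iff.mp; omega
    rw [h3]; congr 1
    conv_rhs => rw [hs, this, List.append_nil]
  · rw [if_pos h0]
    conv_rhs => rw [hs]
    rw [pvChunkVals_append _ _ (by rw [htk]; simp) (by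
        intro hh; rw [hh] at hdl; simp at hdl; omega) (by omega)]
    rw [← h3, ← h2]

theorem pvFold_inv (l : List Int) (hl : ∀ x ∈ l, 0 ≤ x ∧ x ≤ 2147483648) :
    ∀ (s : List Char) (st : List Nat × Nat × Nat), pvInv s st → st.2.2 < 256 →
    pvInv (s ++ (l.map pvPieceA).flatten)
      (l.foldl (fun (st : List Nat × Nat × Nat) x =>
        let (v, L) := pvPieceB x
        pvFlushB st.1 (st.2.1 * 2 ^ L + v) (st.2.2 + L)) st) ∧
    (l.foldl (fun (st : List Nat × Nat × Nat) x =>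
        let (v, L) := pvPieceB x
        pvFlushB st.1 (st.2.1 * 2 ^ L + v) (st.2.2 + L)) st).2.2 < 256 := by
  induction l with
  | nil => intro s st h1 h2; simpa using ⟨h1, h2⟩
  | cons x l ih =>
    intro s st h1 h2
    have hx := hl x (by simp)
    have happ := pvInv_app s (pvPieceA x) st.1 st.2.1 st.2.2 h1
    have hfl := pvFlush_inv (s ++ pvPieceA x) (st.2.2 + (pvPieceA x).length) st.1
      (st.2.1 * 2 ^ (pvPieceA x).length + pvBitsVal (pvPieceA x)) happ
    rw [List.foldl_cons]
    simp only [pvPiece_eq x hx.1 hx.2]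
    have := ih (fun y hy => hl y (by simp [hy])) (s ++ pvPieceA x) _ hfl.1 hfl.2
    rw [List.map_cons, List.flatten_cons, ← List.append_assoc]
    exact this

-- ===== VERDICT (by name: the statement is the Claim_ definition above) =====
theorem libsnark2python_spec : Claim_equal_libsnark2python := by
  unfold Claim_equal_libsnark2python
  intro inputs hdom hpre
  unfold Spec_libsnark2python
  have hl : ∀ x ∈ inputs, 0 ≤ x ∧ x ≤ 2147483648 := by
    intro x hx
    have h1 := hpre x hx
    have h2 : pvDomInt x = true := by
      unfold Dom_libsnark2python at hdom
      rw [List.all_eq_true] at hdom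
      exact hdom x hx
    unfold pvDomInt at h2
    simp at h2
    exact ⟨h1, h2.2⟩
  -- A side
  rw [libsnark2python]
  rw [PySem.List.foldl_append_singleton_eq_map]
  simp only [List.nil_append]
  set raw : List Char := (inputs.map pvPieceA).flatten with hraw
  set raw2 : List Char := raw ++ List.replicate (256 * 5 - raw.length) '0' with hraw2
  -- B side invariant
  have hbase : pvInv [] (([] : List Nat), 0, 0) := by
    refine ⟨rfl, rfl, ?_⟩
    simp only [List.take_nil]
    rw [pvChunkVals, dif_pos rfl]
  have hfold := pvFold_inv inputs hl [] ([], 0, 0) hbase (by norm_num)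
  rw [List.nil_append, ← hraw] at hfold
  rw [libsnark2python_alt]
  set st := inputs.foldl (fun (st : List Nat × Nat × Nat) x =>
        let (v, L) := pvPieceB x
        pvFlushB st.1 (st.2.1 * 2 ^ L + v) (st.2.2 + L)) ([], 0, 0) with hst
  obtain ⟨hinv, hlt⟩ := hfold
  have htot : 256 * st.1.length + st.2.2 = raw.length := hinv.1
  have hpad : max (256 * st.1.length + st.2.2) (256 * 5) - (256 * st.1.length + st.2.2)
      = 256 * 5 - raw.length := by omega
  simp only [hpad]
  have hrepl : (List.replicate (256 * 5 - raw.length) '0').length = 256 * 5 - raw.length := by simp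
  have happ := pvInv_app raw (List.replicate (256 * 5 - raw.length) '0') st.1 st.2.1 st.2.2 hinv
  rw [hrepl, pvBitsVal_repl0] at happ
  rw [← hraw2] at happ
  have hfl := pvFlush_inv raw2 (st.2.2 + (256 * 5 - raw.length)) st.1
    (st.2.1 * 2 ^ (256 * 5 - raw.length) + 0) happ
  rw [Nat.add_zero] at hfl
  have hfin := pvInv_final raw2 (pvFlushB st.1 (st.2.1 * 2 ^ (256 * 5 - raw.length)) (st.2.2 + (256 * 5 - raw.length))).1
    (pvFlushB st.1 (st.2.1 * 2 ^ (256 * 5 - raw.length)) (st.2.2 + (256 * 5 - raw.length))).2.1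
    (pvFlushB st.1 (st.2.1 * 2 ^ (256 * 5 - raw.length)) (st.2.2 + (256 * 5 - raw.length))).2.2
    hfl.1 hfl.2
  rw [pvChunksA_eq, ← hfin]
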